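-- pv_equiv track=rewrite | github.com/PaulusBoskabouter/TxmmResearchProject | multithreadded_preprocessing.py | generate_ranges
-- ===== SOURCE A (Python) =====
-- def generate_ranges(start_year, years_per_thread, num_threads, end_year):
--     """
--     Generate fixed year ranges for threads, ensuring the last range ends at the specified year.
--
--     Parameters:
--         start_year (int): The starting year of the range.
--         years_per_thread (int): Base number of years each thread handles.
--         num_threads (int): Total number of threads.
--         end_year (int): The year the last range should end.
--
--     Returns:
--         list of tuples: Each tuple contains the start and end year for a thread.
--     """
--     ranges = []
--     current_start = start_year
--     total_years = end_year - start_year + 1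
--     extra_years = total_years % num_threads  # Remaining years to distribute
--
--     for i in range(num_threads):
--         # Distribute an extra year to the first few threads if there's a remainder
--         extra = 1 if i < extra_years else 0
--         range_end = current_start + years_per_thread + extra - 1
--         ranges.append((current_start, range_end))
--         current_start = range_end + 1
--
--     return ranges
-- ===== SOURCE B (Python) =====
-- def generate_ranges(start_year, years_per_thread, num_threads, end_year):
--     total_years = end_year - start_year + 1
--     extra_years = total_years % num_threads  # raises ZeroDivisionError for 0 threads, like the original
--     return [
--         (start_year + i * years_per_thread + min(i, extra_years),
--          start_year + (i + 1) * years_per_thread + min(i + 1, extra_years) - 1)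
--         for i in range(num_threads)
--     ]
-- ===== Notes on version B (the rewrite author's own statement) =====
-- stated objective: alternative
-- what changed: Replaces the stateful accumulator loop (running current_start threaded through each iteration) with a closed-form per-index comprehension: thread i's range is computed independently as start_year + i*years_per_thread + min(i, extra_years).
import Mathlib
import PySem

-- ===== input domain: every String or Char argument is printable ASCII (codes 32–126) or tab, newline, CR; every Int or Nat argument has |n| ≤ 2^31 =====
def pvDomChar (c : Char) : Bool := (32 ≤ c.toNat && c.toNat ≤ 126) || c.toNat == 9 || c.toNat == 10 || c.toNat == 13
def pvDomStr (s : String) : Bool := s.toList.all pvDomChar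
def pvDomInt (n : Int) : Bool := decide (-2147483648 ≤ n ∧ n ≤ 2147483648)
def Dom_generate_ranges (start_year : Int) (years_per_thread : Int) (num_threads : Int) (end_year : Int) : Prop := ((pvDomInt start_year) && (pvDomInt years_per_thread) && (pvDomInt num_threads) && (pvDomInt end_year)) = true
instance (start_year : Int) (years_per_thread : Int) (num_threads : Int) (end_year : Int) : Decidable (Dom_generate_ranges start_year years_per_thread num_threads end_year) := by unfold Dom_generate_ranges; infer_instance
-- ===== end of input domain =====

-- B replaces A's stateful current_start accumulator with an independent closed-form offset per thread index.

-- ===== PORT A =====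
-- A-side helper: the body of A's for-loop (state = (ranges, current_start)).
def grStep (years_per_thread extra_years : Int) (st : List (Int × Int) × Int) (i : Int) : List (Int × Int) × Int :=
  let extra : Int := if i < extra_years then 1 else 0
  let range_end := st.2 + years_per_thread + extra - 1
  (st.1 ++ [(st.2, range_end)], range_end + 1)

def generate_ranges (start_year : Int) (years_per_thread : Int) (num_threads : Int) (end_year : Int) : List (Int × Int) :=
  let total_years := end_year - start_year + 1
  let extra_years := PySem.Int.mod total_years num_threads
  ((PySem.List.pyRange 0 num_threads 1).foldl (grStep years_per_thread extra_years)
    ([], start_year)).1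

-- ===== PORT B =====
def generate_ranges_alt (start_year : Int) (years_per_thread : Int) (num_threads : Int) (end_year : Int) : List (Int × Int) :=
  let total_years := end_year - start_year + 1
  let extra_years := PySem.Int.mod total_years num_threads
  (PySem.List.pyRange 0 num_threads 1).map (fun i =>
    (start_year + i * years_per_thread + min i extra_years,
     start_year + (i + 1) * years_per_thread + min (i + 1) extra_years - 1))

-- ===== PRECONDITION & SPEC =====
-- Pre_ excludes num_threads = 0, where Python's '%' raises ZeroDivisionError in both A and B.
def Pre_generate_ranges (start_year : Int) (years_per_thread : Int) (num_threads : Int) (end_year : Int) : Prop := num_threads ≠ 0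
instance (start_year : Int) (years_per_thread : Int) (num_threads : Int) (end_year : Int) : Decidable (Pre_generate_ranges start_year years_per_thread num_threads end_year) := by unfold Pre_generate_ranges; infer_instance
def pvWitness_generate_ranges : Int × Int × Int × Int := (2000, 3, 4, 2014)

def Spec_generate_ranges (start_year : Int) (years_per_thread : Int) (num_threads : Int) (end_year : Int) (out : List (Int × Int)) : Prop := out = generate_ranges_alt start_year years_per_thread num_threads end_year
instance (start_year : Int) (years_per_thread : Int) (num_threads : Int) (end_year : Int) (out : List (Int × Int)) : Decidable (Spec_generate_ranges start_year years_per_thread num_threads end_year out) := by unfold Spec_generate_ranges; infer_instance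

-- ===== CLAIM (what is proved, stated in full; the proofs are below) =====
def Claim_equal_generate_ranges : Prop := ∀ (start_year : Int) (years_per_thread : Int) (num_threads : Int) (end_year : Int), Dom_generate_ranges start_year years_per_thread num_threads end_year → Pre_generate_ranges start_year years_per_thread num_threads end_year → Spec_generate_ranges start_year years_per_thread num_threads end_year (generate_ranges start_year years_per_thread num_threads end_year)

-- ===== LEMMAS AND PROOFS =====

-- Loop invariant: folding A's loop body over range(a, a+n) starting from
-- current_start = sy + a*ypt + min a e appends exactly B's closed-form tuples.
lemma gr_loop (sy ypt e : Int) :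
    ∀ (n : Nat) (a : Int) (acc : List (Int × Int)),
      (PySem.List.pyRange a (a + n) 1).foldl (grStep ypt e) (acc, sy + a * ypt + min a e)
      = (acc ++ (PySem.List.pyRange a (a + n) 1).map (fun i =>
          (sy + i * ypt + min i e,
           sy + (i + 1) * ypt + min (i + 1) e - 1)),
         sy + (a + n) * ypt + min (a + n) e) := by
  intro n
  induction n with
  | zero =>
    intro a acc
    rw [PySem.List.pyRange_one_eq_nil (by omega)]
    simp
  | succ n ih =>
    intro a acc
    rw [PySem.List.pyRange_one_cons (by omega : a < a + (n + 1 : Nat))]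
    rw [List.foldl_cons, List.map_cons]
    have hstep : grStep ypt e (acc, sy + a * ypt + min a e) a
        = (acc ++ [(sy + a * ypt + min a e, sy + (a + 1) * ypt + min (a + 1) e - 1)],
           sy + (a + 1) * ypt + min (a + 1) e) := by
      unfold grStep
      split_ifs with h
      · have h1 : min a e = a := by omega
        have h2 : min (a + 1) e = a + 1 := by omega
        simp only [h1, h2, Prod.mk.injEq, List.append_cancel_left_eq, List.cons.injEq]
        and_intros <;> first | trivial | ring
      · have h1 : min a e = e := by omega
        have h2 : min (a + 1) e = e := by omega
        simp only [h1, h2, Prod.mk.injEq, List.append_cancel_left_eq, List.cons.injEq]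
        and_intros <;> first | trivial | ring
    rw [hstep]
    have hrange : (a + 1) + (n : Int) = a + ((n + 1 : Nat) : Int) := by push_cast; ring
    have := ih (a + 1) (acc ++ [(sy + a * ypt + min a e, sy + (a + 1) * ypt + min (a + 1) e - 1)])
    rw [hrange] at this
    rw [this, List.append_assoc, List.singleton_append]

-- ===== VERDICT (by name: the statement is the Claim_ definition above) =====
theorem generate_ranges_spec : Claim_equal_generate_ranges := by
  intro sy ypt nt ey _ hpre
  unfold Spec_generate_ranges generate_ranges generate_ranges_alt
  by_cases hnt : nt ≤ 0
  · rw [PySem.List.pyRange_one_eq_nil hnt]; simp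
  · replace hnt : 0 < nt := by omega
    set e := PySem.Int.mod (ey - sy + 1) nt with he_def
    have he : 0 ≤ e := PySem.Int.mod_nonneg _ hnt
    have h0 : sy = sy + 0 * ypt + min 0 e := by
      have : min (0:Int) e = 0 := by omega
      rw [this]; ring
    have hn : nt = (0:Int) + (nt.toNat : Int) := by omega
    calc ((PySem.List.pyRange 0 nt 1).foldl (grStep ypt e) ([], sy)).1
      = ((PySem.List.pyRange 0 ((0:Int) + (nt.toNat : Int)) 1).foldl (grStep ypt e)
          ([], sy + 0 * ypt + min 0 e)).1 := by rw [← h0, ← hn]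
      _ = (PySem.List.pyRange 0 nt 1).map (fun i =>
          (sy + i * ypt + min i e,
           sy + (i + 1) * ypt + min (i + 1) e - 1)) := by
            rw [gr_loop sy ypt e nt.toNat 0 []]
            rw [← hn]; simp
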